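-- pv_equiv track=rewrite | github.com/robai2002/Leetcode | Problems/4119-minimum-distance-between-three-equal-elements-ii/minimum-distance-between-three-equal-elements-ii.py | minimumDistance
-- ===== SOURCE A (Python) =====
-- from typing import List
--
-- def minimumDistance(nums: List[int]) -> int:
--     mp = dict()
--     mp1 = dict()
--     ans = len(nums)*3
--     for i,num in enumerate(nums):
--         if num in mp1:
--             ans = min(ans,i-mp1[num])
--         if num in mp:
--             mp1[num] = mp[num]
--         mp[num] = i
--     return 2*ans if ans<=len(nums) else -1
-- ===== SOURCE B (Python) =====
-- def minimumDistance(nums):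
--     occ = {}
--     for i, num in enumerate(nums):
--         occ.setdefault(num, []).append(i)
--     ans = len(nums) * 3
--     for idxs in occ.values():
--         for a, c in zip(idxs, idxs[2:]):
--             ans = min(ans, c - a)
--     return 2 * ans if ans <= len(nums) else -1
-- ===== Notes on version B (the rewrite author's own statement) =====
-- stated objective: simpler
-- what changed: B groups all occurrence indices per value in one pass and then scans each value's index list over consecutive triples, instead of A's online scan that maintains two rolling dicts of last and second-to-last index per value.
import Mathlib
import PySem

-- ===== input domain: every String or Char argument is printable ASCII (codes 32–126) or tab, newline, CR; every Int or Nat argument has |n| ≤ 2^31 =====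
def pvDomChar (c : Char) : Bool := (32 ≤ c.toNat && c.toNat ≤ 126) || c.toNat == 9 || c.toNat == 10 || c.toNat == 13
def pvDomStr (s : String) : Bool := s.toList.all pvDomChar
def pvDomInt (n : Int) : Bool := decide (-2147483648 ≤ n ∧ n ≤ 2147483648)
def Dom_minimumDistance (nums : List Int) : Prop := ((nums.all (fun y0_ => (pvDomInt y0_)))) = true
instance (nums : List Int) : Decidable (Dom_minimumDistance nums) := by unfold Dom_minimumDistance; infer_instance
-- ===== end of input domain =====

-- B groups indices per value first and scans consecutive triples, instead of A's
-- online pass with two rolling dicts; objective: simpler (same O(n) cost class).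

-- ===== PORT A =====
-- one loop step of A: (mp, mp1, ans) updated at pair (i, num)
def stepA (st : PySem.Dict Int Int × PySem.Dict Int Int × Int) (p : Int × Int) :
    PySem.Dict Int Int × PySem.Dict Int Int × Int :=
  let mp := st.1
  let mp1 := st.2.1
  let ans := st.2.2
  let ans := if mp1.contains p.2 then min ans (p.1 - (mp1.get? p.2).getD 0) else ans
  let mp1 := if mp.contains p.2 then mp1.insert p.2 ((mp.get? p.2).getD 0) else mp1
  let mp := mp.insert p.2 p.1
  (mp, mp1, ans)

def minimumDistance (nums : List Int) : Int :=
  let st := (PySem.List.enumerate nums).foldl stepA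
    (PySem.Dict.empty, PySem.Dict.empty, (nums.length : Int) * 3)
  if st.2.2 ≤ (nums.length : Int) then 2 * st.2.2 else -1

-- ===== PORT B =====
def minimumDistance_alt (nums : List Int) : Int :=
  let occ : PySem.Dict Int (List Int) :=
    (PySem.List.enumerate nums).foldl (fun d p => d.modify p.2 [] (· ++ [p.1])) PySem.Dict.empty
  let ans := occ.values.foldl
    (fun ans idxs =>
      (idxs.zip (PySem.List.slice idxs (some 2) none)).foldl
        (fun ans q => min ans (q.2 - q.1)) ans)
    ((nums.length : Int) * 3)
  if ans ≤ (nums.length : Int) then 2 * ans else -1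

-- ===== PRECONDITION & SPEC =====
def Spec_minimumDistance (nums : List Int) (out : Int) : Prop := out = minimumDistance_alt nums
instance (nums : List Int) (out : Int) : Decidable (Spec_minimumDistance nums out) := by unfold Spec_minimumDistance; infer_instance

-- ===== CLAIM (what is proved, stated in full; the proofs are below) =====
def Claim_equal_minimumDistance : Prop := ∀ (nums : List Int), Dom_minimumDistance nums → Spec_minimumDistance nums (minimumDistance nums)

-- ===== LEMMAS AND PROOFS =====

-- indices at which value v occurs, for a list of (index, value) pairs
def occI (v : Int) (e : List (Int × Int)) : List Int :=
  (e.filter (fun p => p.2 == v)).map (·.1)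

-- distances of consecutive occurrence triples
def cands : List Int → List Int
  | a :: _b :: c :: t => (c - a) :: cands (_b :: c :: t)
  | _ => []

-- the candidate contributed when index i is appended to occurrence list os
def newC (os : List Int) (i : Int) : List Int :=
  match os.dropLast.getLast? with
  | some s => [i - s]
  | none => []

-- candidates in A's emission order, scanning rest with already-seen prefix pre
def emitted : List (Int × Int) → List (Int × Int) → List Int
  | _, [] => []
  | pre, p :: rest => newC (occI p.2 pre) p.1 ++ emitted (pre ++ [p]) rest

-- candidates grouped by value, in B's order
def grouped (e : List (Int × Int)) : List Int :=
  (PySem.List.dedup (e.map (·.2))).flatMap (fun v => cands (occI v e))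

theorem occI_append (v : Int) (e : List (Int × Int)) (i w : Int) :
    occI v (e ++ [(i, w)]) = occI v e ++ (if w = v then [i] else []) := by
  simp [occI, List.filter_append]
  split_ifs with h <;> simp [h]

theorem cands_append (os : List Int) (i : Int) :
    cands (os ++ [i]) = cands os ++ newC os i := by
  induction os using cands.induct with
  | case1 a b c t ih =>
    simp only [List.cons_append, cands] at *
    rw [ih]
    have : newC (a :: b :: c :: t) i = newC (b :: c :: t) i := by
      simp [newC, List.dropLast]
    rw [this]
  | case2 os h =>
    rcases os with _ | ⟨a, _ | ⟨b, _ | ⟨c, t⟩⟩⟩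
    · simp [cands, newC]
    · simp [cands, newC]
    · simp [cands, newC]
    · exact absurd rfl (h a b c t)

theorem cands_eq_zip (os : List Int) :
    cands os = (os.zip (os.drop 2)).map (fun q => q.2 - q.1) := by
  induction os using cands.induct with
  | case1 a b c t ih => simp [cands, ih]
  | case2 os h =>
    rcases os with _ | ⟨a, _ | ⟨b, _ | ⟨c, t⟩⟩⟩
    · simp [cands]
    · simp [cands]
    · simp [cands]
    · exact absurd rfl (h a b c t)

theorem dedup_append_singleton (l : List Int) (v : Int) :
    PySem.List.dedup (l ++ [v]) =
      if v ∈ l then PySem.List.dedup l else PySem.List.dedup l ++ [v] := by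
  simp only [PySem.List.dedup_eq_ofList]
  rw [PySem.Set.ofList_append]
  simp [PySem.Set.update, PySem.Set.add, PySem.Set.mem_ofList]

theorem occI_eq_nil_of_not_mem (v : Int) (e : List (Int × Int))
    (h : v ∉ e.map (·.2)) : occI v e = [] := by
  simp only [occI, List.map_eq_nil_iff, List.filter_eq_nil_iff]
  intro p hp
  simp only [beq_iff_eq]
  intro hpv
  exact h (List.mem_map.mpr ⟨p, hp, hpv⟩)

theorem grouped_step (pre : List (Int × Int)) (i v : Int) :
    (grouped pre ++ newC (occI v pre) i).Perm (grouped (pre ++ [(i, v)])) := by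
  have hmap : (pre ++ [(i, v)]).map (·.2) = pre.map (·.2) ++ [v] := by simp
  by_cases hv : v ∈ pre.map (·.2)
  · -- v already seen: the dedup key list is unchanged, v's block grows at its end
    have hD : PySem.List.dedup ((pre ++ [(i, v)]).map (·.2)) = PySem.List.dedup (pre.map (·.2)) := by
      rw [hmap, dedup_append_singleton, if_pos hv]
    have hvD : v ∈ PySem.List.dedup (pre.map (·.2)) := (PySem.List.mem_dedup _ _).mpr hv
    obtain ⟨l1, l2, hsplit⟩ := List.append_of_mem hvD
    have hnd : (PySem.List.dedup (pre.map (·.2))).Nodup := PySem.List.nodup_dedup _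
    rw [hsplit] at hnd
    rw [List.nodup_append] at hnd
    have hv2 : v ∉ l2 := (List.nodup_cons.mp hnd.2.1).1
    have hv1 : v ∉ l1 := fun h => hnd.2.2 v h v (by simp) rfl
    have hmem : ∀ w, w ∈ l1 ∨ w ∈ l2 →
        cands (occI w (pre ++ [(i, v)])) = cands (occI w pre) := by
      intro w hw
      have hwv : v ≠ w := by rintro rfl; rcases hw with h | h; exacts [hv1 h, hv2 h]
      rw [occI_append, if_neg hwv, List.append_nil]
    have hvblk : cands (occI v (pre ++ [(i, v)]))
        = cands (occI v pre) ++ newC (occI v pre) i := by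
      rw [occI_append, if_pos rfl, cands_append]
    simp only [grouped, hD, hsplit, List.flatMap_append, List.flatMap_cons]
    rw [hvblk, List.flatMap_congr (fun a ha => hmem a (Or.inl ha)),
        List.flatMap_congr (fun a ha => hmem a (Or.inr ha))]
    have :
        l1.flatMap (fun w => cands (occI w pre)) ++ cands (occI v pre) ++
          l2.flatMap (fun w => cands (occI w pre)) ++ newC (occI v pre) i
        = l1.flatMap (fun w => cands (occI w pre)) ++ (cands (occI v pre) ++
            (l2.flatMap (fun w => cands (occI w pre)) ++ newC (occI v pre) i)) := by
      simp
    rw [← List.append_assoc, ← List.append_assoc, this]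
    refine (List.Perm.append_left _ (List.Perm.append_left _ List.perm_append_comm)).trans
      (List.Perm.of_eq ?_)
    simp
  · -- first occurrence of v: its block is still empty, nothing is emitted
    have hocc : occI v pre = [] := occI_eq_nil_of_not_mem v pre hv
    have hD : PySem.List.dedup ((pre ++ [(i, v)]).map (·.2))
        = PySem.List.dedup (pre.map (·.2)) ++ [v] := by
      rw [hmap, dedup_append_singleton, if_neg hv]
    have h1 : ∀ w ∈ PySem.List.dedup (pre.map (·.2)),
        cands (occI w (pre ++ [(i, v)])) = cands (occI w pre) := by
      intro w hw
      have hwv : v ≠ w := by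
        rintro rfl; exact hv ((PySem.List.mem_dedup _ _).mp hw)
      rw [occI_append, if_neg hwv, List.append_nil]
    have h2 : occI v (pre ++ [(i, v)]) = [i] := by
      rw [occI_append, if_pos rfl, hocc, List.nil_append]
    simp only [grouped, hD, hocc, newC, List.dropLast_nil, List.getLast?_nil,
      List.flatMap_append, List.flatMap_cons, List.flatMap_nil, List.append_nil, h2,
      cands, List.flatMap_congr h1]
    exact List.Perm.refl _

theorem perm_emitted (rest : List (Int × Int)) :
    ∀ pre, (grouped pre ++ emitted pre rest).Perm (grouped (pre ++ rest)) := by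
  induction rest with
  | nil => intro pre; simp [emitted]
  | cons p rest ih =>
    intro pre
    have h1 := grouped_step pre p.1 p.2
    have h2 := ih (pre ++ [p])
    have e1 : grouped pre ++ emitted pre (p :: rest)
        = (grouped pre ++ newC (occI p.2 pre) p.1) ++ emitted (pre ++ [p]) rest := by
      simp [emitted]
    have e2 : pre ++ [p] ++ rest = pre ++ p :: rest := by simp
    rw [e1, ← e2]
    exact (h1.append_right _).trans h2

theorem foldA (rest : List (Int × Int)) :
    ∀ (mp mp1 : PySem.Dict Int Int) (a : Int) (pre : List (Int × Int)),
    (∀ v, mp.get? v = (occI v pre).getLast?) →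
    (∀ v, mp1.get? v = (occI v pre).dropLast.getLast?) →
    (rest.foldl stepA (mp, mp1, a)).2.2 = (emitted pre rest).foldl min a := by
  induction rest with
  | nil => intro mp mp1 a pre _ _; simp [emitted]
  | cons p rest ih =>
    intro mp mp1 a pre hmp hmp1
    obtain ⟨i, num⟩ := p
    have hc1 : mp1.contains num = ((occI num pre).dropLast.getLast?).isSome := by
      rw [PySem.Dict.contains_eq_isSome_get?, hmp1]
    have hcontains : mp.contains num = ((occI num pre).getLast?).isSome := by
      rw [PySem.Dict.contains_eq_isSome_get?, hmp]
    -- the new accumulator after this step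
    have hans : (stepA (mp, mp1, a) (i, num)).2.2
        = (newC (occI num pre) i).foldl min a := by
      simp only [stepA, hc1, hmp1, newC]
      cases h : (occI num pre).dropLast.getLast? with
      | none => simp
      | some s => simp
    -- the two dict invariants at pre ++ [(i, num)]
    have hmp' : ∀ v, (stepA (mp, mp1, a) (i, num)).1.get? v
        = (occI v (pre ++ [(i, num)])).getLast? := by
      intro v
      simp only [stepA]
      by_cases hvn : v = num
      · subst hvn
        rw [PySem.Dict.get?_insert_self, occI_append, if_pos rfl, List.getLast?_concat]
      · rw [PySem.Dict.get?_insert_of_ne _ _ hvn, hmp, occI_append,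
          if_neg (fun h => hvn h.symm), List.append_nil]
    have hmp1' : ∀ v, (stepA (mp, mp1, a) (i, num)).2.1.get? v
        = (occI v (pre ++ [(i, num)])).dropLast.getLast? := by
      intro v
      simp only [stepA]
      by_cases hvn : v = num
      · subst hvn
        rw [occI_append, if_pos rfl, List.dropLast_concat]
        cases h : (occI v pre).getLast? with
        | none =>
          have hocc : occI v pre = [] := List.getLast?_eq_none_iff.mp h
          have : mp.contains v = false := by rw [hcontains, h]; rfl
          rw [this]
          simp only [if_neg Bool.false_ne_true]
          rw [hmp1, hocc]
          simp
        | some s =>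
          have : mp.contains v = true := by rw [hcontains, h]; rfl
          rw [this, if_pos rfl, PySem.Dict.get?_insert_self, hmp, h]
          rfl
      · have hne : ¬ (num = v) := fun h => hvn h.symm
        rw [occI_append, if_neg hne, List.append_nil]
        by_cases hc : mp.contains num = true
        · rw [if_pos hc, PySem.Dict.get?_insert_of_ne _ _ hvn, hmp1]
        · rw [if_neg hc, hmp1]
    have := ih (stepA (mp, mp1, a) (i, num)).1 (stepA (mp, mp1, a) (i, num)).2.1
      (stepA (mp, mp1, a) (i, num)).2.2 (pre ++ [(i, num)]) hmp' hmp1'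
    rw [List.foldl_cons]
    calc (rest.foldl stepA (stepA (mp, mp1, a) (i, num))).2.2
        = (emitted (pre ++ [(i, num)]) rest).foldl min (stepA (mp, mp1, a) (i, num)).2.2 := this
      _ = (emitted pre ((i, num) :: rest)).foldl min a := by
          rw [emitted, List.foldl_append, hans]

theorem valuesB (nums : List Int) :
    ((PySem.List.enumerate nums).foldl
        (fun d p => d.modify p.2 [] (· ++ [p.1])) PySem.Dict.empty).values =
      (PySem.List.dedup nums).map (fun v => occI v (PySem.List.enumerate nums)) := by
  have hk : ((PySem.List.enumerate nums).foldl
      (fun d p => d.modify p.2 [] (· ++ [p.1])) PySem.Dict.empty).keys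
      = PySem.List.dedup nums := by
    rw [PySem.Dict.keys_foldl_modify_key (PySem.List.enumerate nums) (fun p => p.2) []
        (fun _ p => (· ++ [p.1])) PySem.Dict.empty]
    rw [PySem.Dict.keys_empty, PySem.Set.update_nil_left, PySem.List.map_snd_enumerate]
    simp
  have hnd : ((PySem.List.enumerate nums).foldl
      (fun d p => d.modify p.2 [] (· ++ [p.1])) PySem.Dict.empty).keys.Nodup := by
    rw [hk]; exact PySem.List.nodup_dedup _
  have hg : ∀ v, ((PySem.List.enumerate nums).foldl
      (fun d p => d.modify p.2 [] (· ++ [p.1])) PySem.Dict.empty).getD v []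
      = occI v (PySem.List.enumerate nums) := by
    intro v
    have hfold : (PySem.List.enumerate nums).foldl
        (fun d p => d.modify p.2 [] (· ++ [p.1])) PySem.Dict.empty
        = ((PySem.List.enumerate nums).map (fun p => (p.2, p.1))).foldl
            (fun d q => d.modify q.1 [] (· ++ [q.2])) PySem.Dict.empty := by
      rw [List.foldl_map]
    rw [hfold, PySem.Dict.getD_foldl_modify_append]
    simp only [occI, List.filter_map, List.map_map]
    rfl
  rw [PySem.Dict.values_eq_map_keys _ hnd [], hk]
  exact List.map_congr_left (fun v _ => hg v)

theorem foldl_min_flatMap (l : List Int) (f : Int → List Int) (a : Int) :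
    (l.flatMap f).foldl min a = l.foldl (fun a v => (f v).foldl min a) a := by
  induction l generalizing a with
  | nil => simp
  | cons x t ih => simp [List.flatMap_cons, List.foldl_append, ih]

theorem innerB (a : Int) (os : List Int) :
    (os.zip (PySem.List.slice os (some 2) none)).foldl (fun a q => min a (q.2 - q.1)) a
      = (cands os).foldl min a := by
  rw [PySem.List.slice_from os (by norm_num : (0 : Int) ≤ 2)]
  rw [cands_eq_zip, List.foldl_map]
  rfl

-- ===== VERDICT (by name: the statement is the Claim_ definition above) =====
theorem minimumDistance_spec : Claim_equal_minimumDistance := by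
  intro nums _
  unfold Spec_minimumDistance minimumDistance minimumDistance_alt
  have hA : ((PySem.List.enumerate nums).foldl stepA
      (PySem.Dict.empty, PySem.Dict.empty, (nums.length : Int) * 3)).2.2
      = (emitted [] (PySem.List.enumerate nums)).foldl min ((nums.length : Int) * 3) :=
    foldA _ _ _ _ [] (fun v => by simp [occI, PySem.Dict.get?_empty])
      (fun v => by simp [occI, PySem.Dict.get?_empty])
  have hperm : (emitted [] (PySem.List.enumerate nums)).Perm
      (grouped (PySem.List.enumerate nums)) := by
    have h := perm_emitted (PySem.List.enumerate nums) []
    simpa [grouped] using h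
  have hmin : (emitted [] (PySem.List.enumerate nums)).foldl min ((nums.length : Int) * 3)
      = (grouped (PySem.List.enumerate nums)).foldl min ((nums.length : Int) * 3) :=
    hperm.foldl_eq' (fun x _ y _ z => min_right_comm z x y) _
  have hB : (((PySem.List.enumerate nums).foldl
        (fun d p => d.modify p.2 [] (· ++ [p.1])) PySem.Dict.empty).values).foldl
      (fun ans idxs => (idxs.zip (PySem.List.slice idxs (some 2) none)).foldl
        (fun ans q => min ans (q.2 - q.1)) ans) ((nums.length : Int) * 3)
      = (grouped (PySem.List.enumerate nums)).foldl min ((nums.length : Int) * 3) := by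
    rw [valuesB, List.foldl_map]
    have hcongr : ∀ (a : Int),
        (PySem.List.dedup nums).foldl
          (fun a v => ((occI v (PySem.List.enumerate nums)).zip
              (PySem.List.slice (occI v (PySem.List.enumerate nums)) (some 2) none)).foldl
            (fun a q => min a (q.2 - q.1)) a) a
        = (PySem.List.dedup nums).foldl
          (fun a v => (cands (occI v (PySem.List.enumerate nums))).foldl min a) a := by
      intro a
      exact List.foldl_ext _ _ a (fun a' v _ => innerB a' _)
    rw [hcongr, ← foldl_min_flatMap]
    have : (grouped (PySem.List.enumerate nums)) = (PySem.List.dedup nums).flatMap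
        (fun v => cands (occI v (PySem.List.enumerate nums))) := by
      rw [grouped, PySem.List.map_snd_enumerate]
    rw [this]
  simp only [hA, hmin, hB]
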